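-- pv_equiv track=rewrite | github.com/apaidusis-boop/Personal-Valuator | agents/helena/audit.py | _count_body_lines
-- ===== SOURCE A (Python) =====
-- def _count_body_lines(text: str) -> int:
--     """Count non-blank lines, excluding YAML frontmatter (first --- ... --- block)."""
--     lines = text.splitlines()
--     in_front = False
--     front_done = False
--     body: list[str] = []
--     for i, ln in enumerate(lines):
--         if i == 0 and ln.strip() == "---":
--             in_front = True
--             continue
--         if in_front and ln.strip() == "---":
--             in_front = False
--             front_done = True
--             continue
--         if in_front:
--             continue
--         body.append(ln)
--     # if no closing --- found, treat whole file as body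
--     if in_front:
--         body = lines
--     return sum(1 for ln in body if ln.strip())
-- ===== SOURCE B (Python) =====
-- def _count_body_lines(text: str) -> int:
--     """Count non-blank lines, excluding YAML frontmatter (first --- ... --- block)."""
--     lines = text.splitlines()
--     body = lines
--     if lines and lines[0].strip() == "---":
--         for i in range(1, len(lines)):
--             if lines[i].strip() == "---":
--                 body = lines[i + 1:]
--                 break
--     return len([ln for ln in body if ln.strip()])
-- ===== Notes on version B (the rewrite author's own statement) =====
-- stated objective: simpler
-- what changed: Replaces the stateful flag-driven accumulation loop by computing the body slice directly (find the closing '---' index, take the suffix) and counting non-blank lines in a separate pass.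
import Mathlib
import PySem

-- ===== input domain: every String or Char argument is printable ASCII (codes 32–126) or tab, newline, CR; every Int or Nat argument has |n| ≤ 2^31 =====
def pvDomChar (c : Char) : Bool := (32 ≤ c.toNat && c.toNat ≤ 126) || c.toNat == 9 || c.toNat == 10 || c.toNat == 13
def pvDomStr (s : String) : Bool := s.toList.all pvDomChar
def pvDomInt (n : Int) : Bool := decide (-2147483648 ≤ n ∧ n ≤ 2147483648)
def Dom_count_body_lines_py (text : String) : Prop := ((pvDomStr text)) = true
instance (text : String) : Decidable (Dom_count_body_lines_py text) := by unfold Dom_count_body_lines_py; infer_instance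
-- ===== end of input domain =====

-- B computes the body slice directly (find the closing '---', take the suffix) and counts in a
-- separate pass, instead of A's stateful flag-driven accumulation loop; same value everywhere.

-- ===== PORT A =====
-- one step of A's for-loop over enumerate(lines): state = (in_front, front_done, body)
def pvStepA (st : Bool × Bool × List String) (p : Int × String) : Bool × Bool × List String :=
  let in_front := st.1
  let front_done := st.2.1
  let body := st.2.2
  if p.1 == 0 && PySem.Str.strip p.2 == "---" then (true, front_done, body)
  else if in_front && PySem.Str.strip p.2 == "---" then (false, true, body)
  else if in_front then st
  else (in_front, front_done, body ++ [p.2])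

def count_body_lines_py (text : String) : Int :=
  let lines := PySem.Str.splitlines text
  let st := (PySem.List.enumerate lines 0).foldl pvStepA (false, false, [])
  let body := if st.1 then lines else st.2.2
  body.foldl (fun acc ln => if PySem.Str.strip ln != "" then acc + 1 else acc) (0 : Int)

-- ===== PORT B =====
def count_body_lines_py_alt (text : String) : Int :=
  let lines := PySem.Str.splitlines text
  let body :=
    match lines with
    | [] => lines
    | l0 :: rest =>
      if PySem.Str.strip l0 == "---" then
        match rest.findIdx? (fun ln => PySem.Str.strip ln == "---") with
        | some j => rest.drop (j + 1)
        | none => lines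
      else lines
  ((body.filter (fun ln => PySem.Str.strip ln != "")).length : Int)

-- ===== PRECONDITION & SPEC =====
def Spec_count_body_lines_py (text : String) (out : Int) : Prop := out = count_body_lines_py_alt text
instance (text : String) (out : Int) : Decidable (Spec_count_body_lines_py text out) := by unfold Spec_count_body_lines_py; infer_instance

-- ===== CLAIM (what is proved, stated in full; the proofs are below) =====
def Claim_equal_count_body_lines_py : Prop := ∀ (text : String), Dom_count_body_lines_py text → Spec_count_body_lines_py text (count_body_lines_py text)

-- ===== LEMMAS AND PROOFS =====

-- With in_front = false and index ≥ 1, A's loop just appends every line.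
theorem pvFoldA_out (rest : List String) (s : Int) (hs : 1 ≤ s) (fd : Bool) (body : List String) :
    (PySem.List.enumerate rest s).foldl pvStepA (false, fd, body) = (false, fd, body ++ rest) := by
  induction rest generalizing s body with
  | nil => simp [PySem.List.enumerate_nil]
  | cons h t ih =>
    rw [PySem.List.enumerate_cons, List.foldl_cons]
    have hne : (s == (0:Int)) = false := by simp; omega
    by_cases hstr : (PySem.Str.strip h == "---") = true <;>
      · simp only [pvStepA, hne, hstr, Bool.and_true,
          Bool.and_false, Bool.false_eq_true, if_false]
        rw [ih (s+1) (by omega)]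
        simp

-- With in_front = true and index ≥ 1, A's loop skips up to and including the first '---'.
theorem pvFoldA_in (rest : List String) (s : Int) (hs : 1 ≤ s) (fd : Bool) (body : List String) :
    (PySem.List.enumerate rest s).foldl pvStepA (true, fd, body) =
      match rest.findIdx? (fun ln => PySem.Str.strip ln == "---") with
      | some j => (false, true, body ++ rest.drop (j + 1))
      | none => (true, fd, body) := by
  induction rest generalizing s with
  | nil => simp [PySem.List.enumerate_nil, List.findIdx?_nil]
  | cons h t ih =>
    rw [PySem.List.enumerate_cons, List.foldl_cons]
    have hne : (s == (0:Int)) = false := by simp; omega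
    by_cases hstr : (PySem.Str.strip h == "---") = true
    · simp only [pvStepA, hne, hstr, Bool.false_and, Bool.true_and, Bool.false_eq_true,
        if_false, if_true]
      rw [pvFoldA_out t (s+1) (by omega)]
      simp [List.findIdx?_cons, hstr]
    · simp only [pvStepA, hne, Bool.eq_false_iff.mpr hstr,
        Bool.and_false, Bool.false_eq_true, if_false, if_true]
      rw [ih (s+1) (by omega)]
      simp only [List.findIdx?_cons, hstr, Bool.false_eq_true, if_false]
      cases hf : t.findIdx? (fun ln => PySem.Str.strip ln == "---") <;>
        simp [List.drop_succ_cons]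

-- counting loop = filter length
theorem pvCount (l : List String) :
    l.foldl (fun acc ln => if PySem.Str.strip ln != "" then acc + 1 else acc) (0 : Int) =
      ((l.filter (fun ln => PySem.Str.strip ln != "")).length : Int) := by
  rw [PySem.List.foldl_if_add_one]
  simp [List.countP_eq_length_filter]

theorem count_body_eq (text : String) :
    count_body_lines_py text = count_body_lines_py_alt text := by
  unfold count_body_lines_py count_body_lines_py_alt
  simp only []
  cases hl : PySem.Str.splitlines text with
  | nil =>
    simp [PySem.List.enumerate_nil]
  | cons l0 rest =>
    rw [PySem.List.enumerate_cons, List.foldl_cons]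
    by_cases hstr : (PySem.Str.strip l0 == "---") = true
    · simp only [pvStepA, hstr, Bool.and_true, BEq.rfl, if_true]
      rw [show ((0:Int)+1) = 1 from rfl, pvFoldA_in rest 1 (by omega)]
      cases rest.findIdx? (fun ln => PySem.Str.strip ln == "---") <;> exact pvCount _
    · simp only [pvStepA, Bool.eq_false_iff.mpr hstr, Bool.and_false, BEq.rfl,
        Bool.false_eq_true, if_false, List.nil_append]
      rw [show ((0:Int)+1) = 1 from rfl, pvFoldA_out rest 1 (by omega)]
      dsimp only
      exact pvCount _

-- ===== VERDICT (by name: the statement is the Claim_ definition above) =====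
theorem count_body_lines_py_spec : Claim_equal_count_body_lines_py := by
  intro text _
  exact count_body_eq text
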